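-- pv_equiv track=rewrite | github.com/64andy/Advent-of-Code | 2023/12/1_answer.py | incomplete_springs_could_match_layout
-- ===== SOURCE A (Python) =====
-- OPERATIONAL = '.'
--
-- DAMAGED = '#'
--
-- UNKNOWN = '?'
--
-- def springs_to_layout(springs: str) -> list[int]:
--     """
--     Converts a springs string into the layout formation.
--     Note that this *only* looks at damaged tiles, treating
--       unknowns as operational.
--     We're being conservative so we can parse incomplete springs
--       to see if it's possible to prune one.
--     """
--     layout = []
--     current_count = 0
--     in_damaged = False
--     for char in springs:
--         # If we're in a 'run', continue counting it
--         if char == DAMAGED: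
--             in_damaged = True
--             current_count += 1
--         # If we're not in a run, but we were in one, that means it just ended
--         elif in_damaged:
--             layout.append(current_count)
--             current_count = 0
--             in_damaged = False
--         # If we're not in a run, and we didn't read a damaged tile, do nothing
--         else:
--             pass
--     # If we ended on a line, don't forget to add it
--     if in_damaged:
--         layout.append(current_count)
--
--     return layout
--
-- def incomplete_springs_could_match_layout(springs: str, target_layout: list[int]) -> bool:
--     """
--     Checks if this incomplete springs view could be valid, for pruning.
--     Note that these checks are conservative on what they allow.
--
--     This means that if it returns True, it might be valid,
--     however if it return False, it's *DEFINITELY INVALID*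
--     """
--     # We only look at the part of the springs whose values are determined.
--     # Evaluating anything not "locked in" complicates things
--     locked_in_springs = springs.split(UNKNOWN, maxsplit=1)[0]
--     if len(locked_in_springs) == 0: # Don't bother evaluating nothing
--         return True
--     layout = springs_to_layout(locked_in_springs)
--     # If we have more runs than the target, despite being a
--     #   subset of the target, we're definitely wrong
--     if len(layout) > len(target_layout):
--         return False
--     # Check if our final run could still be getting built.
--     # This is because ".###" COULD be proceeded by anything,
--     #   however ".###." is a finalised 3-long run
--     last_run_is_finalised = (locked_in_springs[-1] == OPERATIONAL)
--
--     for i, (our_run, target_run) in enumerate(zip(layout, target_layout)):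
--         is_final_element = (i == len(layout)-1)
--         # If a run is longer than theirs, we've added too many blocks.
--         # Even the final element must pass this check.
--         if our_run > target_run:
--             return False
--         # If a run is shorter than theirs, we've added too few blocks.
--         # The exception is the final element, because we could still be building it
--         if not is_final_element and our_run < target_run:
--             return False
--         # If this is the final element, and we're not in the middle of building a run,
--         #    it's fine to do an equality check.
--         if is_final_element and last_run_is_finalised:
--             return our_run == target_run
--
--     return True
-- ===== SOURCE B (Python) =====
-- def incomplete_springs_could_match_layout(springs: str, target_layout: list[int]) -> bool:
--     # Recursive matcher: never builds the run-length list.  It jumps from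
--     # '#'-run to '#'-run with str.find, measures each run in place, and
--     # consumes one target entry per run; the final run (no '#' after it) may
--     # still be under construction unless the locked prefix ends in '.'.
--     locked = springs.split('?', 1)[0]
--     if not locked:
--         return True
--     fin = locked[-1] == '.'
--     n = len(locked)
--
--     def go(pos: int, ti: int) -> bool:
--         j = locked.find('#', pos)
--         if j == -1:
--             return True
--         k = j + 1
--         while k < n and locked[k] == '#':
--             k += 1
--         if ti == len(target_layout):
--             return False
--         r = k - j
--         t = target_layout[ti]
--         if locked.find('#', k) == -1:
--             return r == t if fin else r <= t
--         return r == t and go(k, ti + 1)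
--
--     return go(0, 0)
-- ===== Notes on version B (the rewrite author's own statement) =====
-- stated objective: alternative
-- what changed: A stages two passes (a character state machine that materialises the full run-length list, then an indexed comparison loop with an is-final flag and early returns); B never builds that list: a recursive matcher jumps to each '#'-run with find, measures it in place, consumes one target entry per run, and decides the final-run rule by a find lookahead for a later '#'.
import Mathlib
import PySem

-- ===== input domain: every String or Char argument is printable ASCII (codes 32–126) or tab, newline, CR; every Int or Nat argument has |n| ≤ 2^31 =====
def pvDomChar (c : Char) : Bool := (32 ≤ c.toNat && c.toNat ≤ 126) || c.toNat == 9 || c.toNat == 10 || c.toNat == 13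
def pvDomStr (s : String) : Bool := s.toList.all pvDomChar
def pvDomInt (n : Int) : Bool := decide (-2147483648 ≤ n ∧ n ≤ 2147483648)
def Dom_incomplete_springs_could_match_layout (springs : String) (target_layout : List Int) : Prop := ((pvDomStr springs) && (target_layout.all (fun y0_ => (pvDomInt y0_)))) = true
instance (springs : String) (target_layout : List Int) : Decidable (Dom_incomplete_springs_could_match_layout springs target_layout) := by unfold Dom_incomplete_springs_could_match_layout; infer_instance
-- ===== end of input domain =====

-- B replaces A's two staged passes (build the full run-length list, then compare it
-- index-by-index with flags) by a recursive matcher that finds, measures and checks one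
-- '#'-run at a time, never materialising the list; objective: alternative (same asymptotic
-- cost; a timing run measured a constant-factor speedup).

-- ===== PORT A =====
-- the body of A's for-loop over `springs` (state: (layout, current_count, in_damaged))
def aStep (st : List Int × Int × Bool) (char : Char) : List Int × Int × Bool :=
  if char = '#' then (st.1, st.2.1 + 1, true)
  else if st.2.2 then (st.1 ++ [st.2.1], 0, false)
  else st

-- the trailing "if in_damaged: layout.append(current_count)"
def aFinish (st : List Int × Int × Bool) : List Int :=
  if st.2.2 then st.1 ++ [st.2.1] else st.1

-- springs_to_layout
def springsToLayout (s : List Char) : List Int :=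
  aFinish (s.foldl aStep ([], 0, false))

-- A's "for i, (our_run, target_run) in enumerate(zip(layout, target_layout))" with early returns
def aLoop : List Int → List Int → Nat → Nat → Bool → Bool
  | ourRun :: l, targetRun :: t, i, n, fin =>
      let isFinal := i == n - 1
      if ourRun > targetRun then false
      else if !isFinal && decide (ourRun < targetRun) then false
      else if isFinal && fin then ourRun == targetRun
      else aLoop l t (i + 1) n fin
  | _, _, _, _, _ => true

def incomplete_springs_could_match_layout (springs : String) (target_layout : List Int) : Bool :=
  -- springs.split('?', 1)[0]: split always returns a nonempty list, so [0] is its head (exact)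
  let locked := (PySem.Chars.splitOnMax springs.toList ['?'] 1).headD []
  if locked.length = 0 then true
  else
    let layout := springsToLayout locked
    if layout.length > target_layout.length then false
    else
      -- locked_in_springs[-1] == '.'; locked is nonempty here, so pyGetD is exact
      let lastRunIsFinalised := PySem.List.pyGetD locked (-1) ' ' = '.'
      aLoop layout target_layout 0 layout.length lastRunIsFinalised

-- ===== PORT B =====
-- locked.find('#', pos): first index ≥ pos holding '#', or -1 (index in range, so getD is exact)
def findHash (locked : List Char) (n pos : Nat) : Int :=
  if pos < n then
    if locked.getD pos ' ' = '#' then (pos : Int) else findHash locked n (pos + 1)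
  else -1
termination_by n - pos
decreasing_by omega

-- needed by go's termination proof
theorem findHash_bounds (locked : List Char) (n pos : Nat) :
    findHash locked n pos = -1 ∨
      (pos ≤ (findHash locked n pos).toNat ∧ (findHash locked n pos).toNat < n) := by
  fun_induction findHash with
  | case1 pos h1 h2 => right; simp; omega
  | case2 pos h1 h2 ih =>
      rcases ih with h | ⟨h3, h4⟩
      · left; exact h
      · right; exact ⟨by omega, h4⟩
  | case3 pos h1 => left; rfl

-- "while k < n and locked[k] == '#': k += 1"
def scanRun (locked : List Char) (n : Nat) (k : Nat) : Nat :=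
  if k < n ∧ locked.getD k ' ' = '#' then scanRun locked n (k + 1) else k
termination_by n - k
decreasing_by omega

theorem le_scanRun (locked : List Char) (n k : Nat) : k ≤ scanRun locked n k := by
  fun_induction scanRun locked n k with
  | case1 k h ih => omega
  | case2 k h => omega

-- the inner recursive matcher go(pos, ti)
def go (locked : List Char) (n : Nat) (fin : Bool) (tl : List Int) (pos ti : Nat) : Bool :=
  let j := findHash locked n pos
  if hj : j = -1 then true
  else
    let k := scanRun locked n (j.toNat + 1)
    if ti = tl.length then false
    else
      let r : Int := (k : Int) - j
      let t := tl.getD ti 0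
      if findHash locked n k = -1 then (if fin then r == t else decide (r ≤ t))
      else (r == t) && go locked n fin tl k (ti + 1)
termination_by n - pos
decreasing_by
  rcases findHash_bounds locked n pos with h | ⟨h1, h2⟩
  · exact absurd h hj
  · have := le_scanRun locked n ((findHash locked n pos).toNat + 1); omega

def incomplete_springs_could_match_layout_alt (springs : String) (target_layout : List Int) : Bool :=
  let locked := (PySem.Chars.splitOnMax springs.toList ['?'] 1).headD []
  if locked.isEmpty then true
  else
    -- locked[-1] == '.': locked is nonempty here, so pyGetD is exact
    let fin := decide (PySem.List.pyGetD locked (-1) ' ' = '.')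
    go locked locked.length fin target_layout 0 0

-- ===== PRECONDITION & SPEC =====
def Spec_incomplete_springs_could_match_layout (springs : String) (target_layout : List Int) (out : Bool) : Prop := out = incomplete_springs_could_match_layout_alt springs target_layout
instance (springs : String) (target_layout : List Int) (out : Bool) : Decidable (Spec_incomplete_springs_could_match_layout springs target_layout out) := by unfold Spec_incomplete_springs_could_match_layout; infer_instance

-- ===== CLAIM (what is proved, stated in full; the proofs are below) =====
def Claim_equal_incomplete_springs_could_match_layout : Prop := ∀ (springs : String) (target_layout : List Int), Dom_incomplete_springs_could_match_layout springs target_layout → Spec_incomplete_springs_could_match_layout springs target_layout (incomplete_springs_could_match_layout springs target_layout)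

-- ===== LEMMAS AND PROOFS =====

-- reference description of the '#'-run lengths, used only by the proofs
def groups : List Char → List Int
  | [] => []
  | c :: cs =>
      if c = '#' then (1 + ((cs.takeWhile (· = '#')).length : Int)) :: groups (cs.dropWhile (· = '#'))
      else groups cs
termination_by l => l.length
decreasing_by
  · have := cs.length_dropWhile_le (· = '#'); simp; omega
  · simp

-- reference matcher: runs against targets, last run special
def matchRuns : List Int → List Int → Bool → Bool
  | [], _, _ => true
  | _ :: _, [], _ => false
  | [r], t :: _, fin => if fin then r == t else decide (r ≤ t)
  | r :: r2 :: rest, t :: ts, fin => (r == t) && matchRuns (r2 :: rest) ts fin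

theorem dropWhile_eq_drop_len (l : List Char) (p : Char → Bool) :
    l.dropWhile p = l.drop (l.takeWhile p).length := by
  induction l with
  | nil => rfl
  | cons a l ih => by_cases h : p a <;> simp [h, ih]

theorem scanRun_spec (locked : List Char) (n j : Nat) (hn : n = locked.length) :
    scanRun locked n j = j + ((locked.drop j).takeWhile (· = '#')).length := by
  fun_induction scanRun locked n j with
  | case1 j h ih =>
      obtain ⟨hj, hc⟩ := h
      have hd : locked.drop j = locked[j] :: locked.drop (j + 1) :=
        List.drop_eq_getElem_cons (by omega)
      have hcg : locked[j] = '#' := by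
        rwa [List.getD_eq_getElem locked ' ' (by omega)] at hc
      rw [ih, hd, hcg]
      simp
      omega
  | case2 j h =>
      by_cases hj : j < n
      · have hc : ¬ locked.getD j ' ' = '#' := fun hc => h ⟨hj, hc⟩
        have hd : locked.drop j = locked[j] :: locked.drop (j + 1) :=
          List.drop_eq_getElem_cons (by omega)
        have hcg : ¬ locked[j] = '#' := by
          rwa [List.getD_eq_getElem locked ' ' (by omega)] at hc
        rw [hd]
        simp [hcg]
      · have : locked.drop j = [] := List.drop_eq_nil_of_le (by omega)
        rw [this]; simp

-- what findHash + scanRun see of groups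
theorem groups_decomp (locked : List Char) (n pos : Nat) (hn : n = locked.length) :
    (findHash locked n pos = -1 ∧ groups (locked.drop pos) = []) ∨
    (∃ j : Nat, findHash locked n pos = (j : Int) ∧ pos ≤ j ∧ j < n ∧
      groups (locked.drop pos) =
        ((scanRun locked n (j + 1) : Int) - (j : Int)) ::
          groups (locked.drop (scanRun locked n (j + 1)))) := by
  fun_induction findHash locked n pos with
  | case1 pos h1 h2 =>
      right
      refine ⟨pos, rfl, le_refl _, h1, ?_⟩
      have hd : locked.drop pos = locked[pos] :: locked.drop (pos + 1) :=
        List.drop_eq_getElem_cons (by omega)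
      have hcg : locked[pos] = '#' := by
        rwa [List.getD_eq_getElem locked ' ' (by omega)] at h2
      rw [hd, groups, if_pos hcg]
      have hscan : scanRun locked n (pos + 1) =
          (pos + 1) + ((locked.drop (pos + 1)).takeWhile (· = '#')).length :=
        scanRun_spec locked n (pos + 1) hn
      have hdw : (locked.drop (pos + 1)).dropWhile (· = '#') =
          locked.drop (scanRun locked n (pos + 1)) := by
        rw [dropWhile_eq_drop_len, List.drop_drop, hscan]
      rw [hdw]
      congr 1
      rw [hscan]
      push_cast
      ring
  | case2 pos h1 h2 ih =>
      have hd : locked.drop pos = locked[pos] :: locked.drop (pos + 1) :=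
        List.drop_eq_getElem_cons (by omega)
      have hcg : ¬ locked[pos] = '#' := by
        rwa [List.getD_eq_getElem locked ' ' (by omega)] at h2
      have hg : groups (locked.drop pos) = groups (locked.drop (pos + 1)) := by
        rw [hd, groups, if_neg hcg]
      rcases ih with ⟨h3, h4⟩ | ⟨j, h3, h4, h5, h6⟩
      · left; exact ⟨h3, by rw [hg]; exact h4⟩
      · right; exact ⟨j, h3, by omega, h5, by rw [hg]; exact h6⟩
  | case3 pos h1 =>
      left
      refine ⟨rfl, ?_⟩
      rw [List.drop_eq_nil_of_le (by omega)]
      simp [groups]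

theorem aInv (cs : List Char) (L : List Int) (cnt : Int) (ind : Bool)
    (h0 : ind = false → cnt = 0) :
    aFinish (cs.foldl aStep (L, cnt, ind)) =
      if ind then
        L ++ (cnt + ((cs.takeWhile (· = '#')).length : Int)) :: groups (cs.dropWhile (· = '#'))
      else L ++ groups cs := by
  induction cs generalizing L cnt ind with
  | nil =>
      cases ind with
      | false => simp [aFinish, groups]
      | true => simp [aFinish, groups]
  | cons c cs ih =>
      rw [List.foldl_cons]
      by_cases hc : c = '#'
      · rw [show aStep (L, cnt, ind) c = (L, cnt + 1, true) from by simp [aStep, hc]]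
        rw [ih L (cnt + 1) true (by simp)]
        cases ind with
        | true =>
            simp only [List.takeWhile_cons, List.dropWhile_cons, hc]
            simp
            ring
        | false =>
            have hcnt : cnt = 0 := h0 rfl
            subst hcnt
            simp only [if_neg Bool.false_ne_true]
            rw [groups, if_pos hc]
            simp
      · cases ind with
        | true =>
            rw [show aStep (L, cnt, true) c = (L ++ [cnt], 0, false) from by simp [aStep, hc]]
            rw [ih (L ++ [cnt]) 0 false (fun _ => rfl)]
            simp only [List.takeWhile_cons, List.dropWhile_cons]
            simp [hc, groups]
        | false =>
            have hcnt : cnt = 0 := h0 rfl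
            subst hcnt
            rw [show aStep (L, 0, false) c = (L, 0, false) from by simp [aStep, hc]]
            rw [ih L 0 false (fun _ => rfl)]
            simp only [if_neg Bool.false_ne_true]
            rw [groups, if_neg hc]

theorem springsToLayout_eq (cs : List Char) : springsToLayout cs = groups cs := by
  have := aInv cs [] 0 false (fun _ => rfl)
  simpa [springsToLayout] using this

theorem aLoop_eq (fin : Bool) :
    ∀ (l t : List Int) (i : Nat) (hl : l ≠ []) (_ht : l.length ≤ t.length),
      aLoop l t i (i + l.length) fin =
        ((l.dropLast == t.take (l.length - 1)) &&
          (if fin then (l.getLast hl == t.getD (l.length - 1) 0)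
           else decide (l.getLast hl ≤ t.getD (l.length - 1) 0))) := by
  intro l
  induction l with
  | nil => intro t i hl _; exact absurd rfl hl
  | cons a l' ih =>
      intro t i hl ht
      cases t with
      | nil => simp at ht
      | cons b t' =>
          cases l' with
          | nil =>
              simp only [aLoop]
              simp only [List.length_cons, List.length_nil]
              have hfin : (i == i + (0 + 1) - 1) = true := by simp
              simp only [hfin]
              cases fin with
              | true =>
                  by_cases hab : a > b
                  · simp [hab]; omega
                  · simp [hab]
              | false =>
                  by_cases hab : a > b
                  · simp [hab]
                  · simp [hab]; omega
          | cons a2 l'' =>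
              have hnf : (i == i + (a :: a2 :: l'').length - 1) = false := by
                simp only [beq_eq_false_iff_ne]
                simp
              simp only [aLoop, hnf]
              have ht' : (a2 :: l'').length ≤ t'.length := by
                simp only [List.length_cons] at ht ⊢; omega
              -- peel the head off the right-hand side
              simp only [List.dropLast_cons₂, List.length_cons, add_tsub_cancel_right,
                List.take_succ_cons, List.cons_beq_cons, List.getLast_cons (by simp : a2 :: l'' ≠ []),
                List.getD_cons_succ]
              rcases lt_trichotomy a b with hab | hab | hab
              · have h1 : ¬ a > b := by omega
                have h2 : (a == b) = false := by simp; omega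
                simp [h1, hab, h2]
              · subst hab
                have h1 : ¬ a > a := by omega
                have h2 : (decide (a < a)) = false := by simp
                simp only [if_neg h1, Bool.not_false, h2, Bool.and_false, Bool.false_and,
                  if_neg Bool.false_ne_true, beq_self_eq_true, Bool.true_and]
                rw [show i + (l''.length + 1 + 1) = (i + 1) + (a2 :: l'').length from by
                  simp only [List.length_cons]; omega]
                rw [ih t' (i + 1) (by simp) ht']
                simp
              · have h2 : (a == b) = false := by simp; omega
                simp [hab, h2]

theorem matchRuns_eq (fin : Bool) :
    ∀ (L ts : List Int) (h : L ≠ []),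
      matchRuns L ts fin =
        if ts.length < L.length then false
        else ((L.dropLast == ts.take (L.length - 1)) &&
          (if fin then (L.getLast h == ts.getD (L.length - 1) 0)
           else decide (L.getLast h ≤ ts.getD (L.length - 1) 0))) := by
  intro L
  induction L with
  | nil => intro ts h; exact absurd rfl h
  | cons r rest ih =>
      intro ts h
      cases ts with
      | nil =>
          cases rest with
          | nil => simp [matchRuns]
          | cons r2 rest' => simp [matchRuns]
      | cons t ts' =>
          cases rest with
          | nil =>
              simp [matchRuns]
          | cons r2 rest' =>
              have hcond : ((t :: ts').length < (r :: r2 :: rest').length) ↔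
                  (ts'.length < (r2 :: rest').length) := by
                simp only [List.length_cons]; omega
              rw [show matchRuns (r :: r2 :: rest') (t :: ts') fin =
                  ((r == t) && matchRuns (r2 :: rest') ts' fin) from rfl]
              rw [ih ts' (by simp)]
              by_cases hlt : ts'.length < (r2 :: rest').length
              · rw [if_pos hlt, if_pos (hcond.mpr hlt)]
                simp
              · rw [if_neg hlt, if_neg (fun hh => hlt (hcond.mp hh))]
                simp only [List.dropLast_cons₂, List.length_cons, add_tsub_cancel_right,
                  List.take_succ_cons, List.cons_beq_cons,
                  List.getLast_cons (by simp : r2 :: rest' ≠ []), List.getD_cons_succ]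
                simp [Bool.and_assoc]

theorem go_spec (locked : List Char) (n : Nat) (fin : Bool) (tl : List Int)
    (hn : n = locked.length) :
    ∀ (pos ti : Nat), ti ≤ tl.length →
      go locked n fin tl pos ti = matchRuns (groups (locked.drop pos)) (tl.drop ti) fin := by
  intro pos ti
  fun_induction go locked n fin tl pos ti with
  | case1 pos ti jv hj =>
      intro hti
      rcases groups_decomp locked n pos hn with ⟨h1, h2⟩ | ⟨j, h1, h2, h3, h4⟩
      · rw [h2]; rfl
      · have hneg : findHash locked n pos = -1 := hj
        rw [h1] at hneg; omega
  | case2 pos jv hj =>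
      intro hti
      rcases groups_decomp locked n pos hn with ⟨h1, h2⟩ | ⟨j, h1, h2, h3, h4⟩
      · exact absurd h1 hj
      · rw [h4, List.drop_length]; rfl
  | case3 pos ti jv hj kv hti' rv tv hlast hfin =>
      intro hti
      subst hfin
      rcases groups_decomp locked n pos hn with ⟨h1, h2⟩ | ⟨j, h1, h2, h3, h4⟩
      · exact absurd h1 hj
      · have hrv : rv = ((kv : Int) - jv) := rfl
        have htv : tv = tl.getD ti 0 := rfl
        have hkv : kv = scanRun locked n (jv.toNat + 1) := rfl
        have hjv : jv = findHash locked n pos := rfl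
        have hlast' : findHash locked n (scanRun locked n (j + 1)) = -1 := by
          rw [hkv, hjv, h1, Int.toNat_natCast] at hlast; exact hlast
        have hk : groups (locked.drop (scanRun locked n (j + 1))) = [] := by
          rcases groups_decomp locked n (scanRun locked n (j + 1)) hn with ⟨g1, g2⟩ | ⟨j2, g1, _, _, _⟩
          · exact g2
          · rw [g1] at hlast'; omega
        have hti2 : ti < tl.length := by omega
        have hdt : tl.drop ti = tl[ti] :: tl.drop (ti + 1) := List.drop_eq_getElem_cons hti2
        have hgd : tl.getD ti 0 = tl[ti] := List.getD_eq_getElem tl 0 hti2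
        rw [hrv, htv, hkv, hjv, h1, Int.toNat_natCast, h4, hk, hdt, hgd]
        rfl
  | case4 pos ti jv hj kv hti' rv tv hlast hfin =>
      intro hti
      have hf : fin = false := by simpa using hfin
      subst hf
      rcases groups_decomp locked n pos hn with ⟨h1, h2⟩ | ⟨j, h1, h2, h3, h4⟩
      · exact absurd h1 hj
      · have hrv : rv = ((kv : Int) - jv) := rfl
        have htv : tv = tl.getD ti 0 := rfl
        have hkv : kv = scanRun locked n (jv.toNat + 1) := rfl
        have hjv : jv = findHash locked n pos := rfl
        have hlast' : findHash locked n (scanRun locked n (j + 1)) = -1 := by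
          rw [hkv, hjv, h1, Int.toNat_natCast] at hlast; exact hlast
        have hk : groups (locked.drop (scanRun locked n (j + 1))) = [] := by
          rcases groups_decomp locked n (scanRun locked n (j + 1)) hn with ⟨g1, g2⟩ | ⟨j2, g1, _, _, _⟩
          · exact g2
          · rw [g1] at hlast'; omega
        have hti2 : ti < tl.length := by omega
        have hdt : tl.drop ti = tl[ti] :: tl.drop (ti + 1) := List.drop_eq_getElem_cons hti2
        have hgd : tl.getD ti 0 = tl[ti] := List.getD_eq_getElem tl 0 hti2
        rw [hrv, htv, hkv, hjv, h1, Int.toNat_natCast, h4, hk, hdt, hgd]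
        rfl
  | case5 pos ti jv hj kv hti' rv tv hlast ih =>
      intro hti
      rcases groups_decomp locked n pos hn with ⟨h1, h2⟩ | ⟨j, h1, h2, h3, h4⟩
      · exact absurd h1 hj
      · have hrv : rv = ((kv : Int) - jv) := rfl
        have htv : tv = tl.getD ti 0 := rfl
        have hkv : kv = scanRun locked n (jv.toNat + 1) := rfl
        have hjv : jv = findHash locked n pos := rfl
        have hlast' : ¬ findHash locked n (scanRun locked n (j + 1)) = -1 := by
          rw [hkv, hjv, h1, Int.toNat_natCast] at hlast; exact hlast
        have hk : groups (locked.drop (scanRun locked n (j + 1))) ≠ [] := by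
          rcases groups_decomp locked n (scanRun locked n (j + 1)) hn with ⟨g1, g2⟩ | ⟨j2, g1, _, _, g4⟩
          · exact absurd g1 hlast'
          · rw [g4]; simp
        have hti2 : ti < tl.length := by omega
        have hdt : tl.drop ti = tl[ti] :: tl.drop (ti + 1) := List.drop_eq_getElem_cons hti2
        have hgd : tl.getD ti 0 = tl[ti] := List.getD_eq_getElem tl 0 hti2
        rw [ih (by omega), hrv, htv, hkv, hjv, h1, Int.toNat_natCast, h4, hdt, hgd]
        rcases hg : groups (locked.drop (scanRun locked n (j + 1))) with _ | ⟨g, gs⟩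
        · exact absurd hg hk
        · rfl

-- ===== VERDICT (by name: the statement is the Claim_ definition above) =====
theorem incomplete_springs_could_match_layout_spec : Claim_equal_incomplete_springs_could_match_layout := by
  intro springs target _
  unfold Spec_incomplete_springs_could_match_layout
  simp only [incomplete_springs_could_match_layout, incomplete_springs_could_match_layout_alt]
  set locked := (PySem.Chars.splitOnMax springs.toList ['?'] 1).headD [] with hlk
  by_cases hE : locked = []
  · simp [hE]
  · have hlen : locked.length ≠ 0 := by simpa [List.length_eq_zero_iff] using hE
    rw [springsToLayout_eq]
    rw [if_neg (show ¬ locked.length = 0 from hlen)]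
    rw [if_neg (show ¬ locked.isEmpty = true from by simp [List.isEmpty_iff]; exact hE)]
    rw [go_spec locked locked.length _ target rfl 0 0 (by omega)]
    simp only [List.drop_zero]
    by_cases hg0 : groups locked = []
    · rw [hg0]
      simp [aLoop, matchRuns]
    · rw [matchRuns_eq _ (groups locked) target hg0]
      by_cases hk : (groups locked).length > target.length
      · rw [if_pos hk, if_pos (show target.length < (groups locked).length from hk)]
      · rw [if_neg hk, if_neg (show ¬ target.length < (groups locked).length from hk)]
        have hzero : (0 : Nat) + (groups locked).length = (groups locked).length := by omega
        rw [show aLoop (groups locked) target 0 (groups locked).length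
              (decide (PySem.List.pyGetD locked (-1) ' ' = '.')) =
            aLoop (groups locked) target 0 (0 + (groups locked).length)
              (decide (PySem.List.pyGetD locked (-1) ' ' = '.')) from by rw [hzero]]
        rw [aLoop_eq _ (groups locked) target 0 hg0 (by omega)]
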